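-- pv_equiv track=rewrite | github.com/tempifyOS/steganography-project | find runs test func thing v4.py | encode_message_bit
-- ===== SOURCE A (Python) =====
-- def encode_message_bit(s, message_bit, target_run_index, M):
--     """Encode a single message bit into the target_run_index-th run."""
--     desired_parity = int(message_bit)
--
--     # Find the target run
--     runs_found = 0
--     i = 0
--     n = len(s)
--
--     while i < n:
--         run_char = s[i]
--         start = i
--         while i < n and s[i] == run_char:
--             i += 1
--         run_length = i - start
--
--         if run_length >= M:
--             if runs_found == target_run_index:
--                 # This is our target run
--                 actual_parity = run_length % 2
--
--                 if actual_parity != desired_parity: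
--                     # Need to change parity by adjusting length
--                     if run_length > M:
--                         # Safe to shorten - flip the last character to break the run
--                         s[i - 1] = '1' if s[i - 1] == '0' else '0'
--                     else:
--                         # run_length == M, need to extend by 1
--                         if i < n:
--                             # Extend forward by converting next char
--                             s[i] = run_char
--                         elif start > 0:
--                             # Extend backward by converting previous char
--                             s[start - 1] = run_char
--                         else:
--                             # No choice but to shorten (this will break the run)
--                             s[i - 1] = '1' if s[i - 1] == '0' else '0'
--
--                 break
--
--             runs_found += 1
--
--     return s
-- ===== SOURCE B (Python) =====
-- def encode_message_bit(s, message_bit, target_run_index, M):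
--     """Encode a single message bit into the target_run_index-th run.
--
--     Boundary-detection re-implementation: find all run boundaries with one
--     comprehension, pair consecutive boundaries into runs, filter to the
--     qualifying ones, then apply the parity edit to the selected run.
--     """
--     n = len(s)
--     bounds = [j for j in range(n) if j == 0 or s[j] != s[j - 1]] + [n]
--     qualifying = [(a, b) for a, b in zip(bounds, bounds[1:]) if b - a >= M]
--     if 0 <= target_run_index < len(qualifying):
--         start, end = qualifying[target_run_index]
--         length = end - start
--         if length % 2 != int(message_bit):
--             if length > M:
--                 s[end - 1] = '1' if s[end - 1] == '0' else '0'
--             elif end < n: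
--                 s[end] = s[start]
--             elif start > 0:
--                 s[start - 1] = s[start]
--             else:
--                 s[end - 1] = '1' if s[end - 1] == '0' else '0'
--     return s
-- ===== Notes on version B (the rewrite author's own statement) =====
-- stated objective: alternative
-- what changed: Replaces A's interleaved nested-while scan (counting qualifying runs and breaking at the target) by a boundary-detection comprehension that pairs consecutive run boundaries via zip, filters qualifying runs, and indexes the target run directly before applying the same parity edit.
import Mathlib
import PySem

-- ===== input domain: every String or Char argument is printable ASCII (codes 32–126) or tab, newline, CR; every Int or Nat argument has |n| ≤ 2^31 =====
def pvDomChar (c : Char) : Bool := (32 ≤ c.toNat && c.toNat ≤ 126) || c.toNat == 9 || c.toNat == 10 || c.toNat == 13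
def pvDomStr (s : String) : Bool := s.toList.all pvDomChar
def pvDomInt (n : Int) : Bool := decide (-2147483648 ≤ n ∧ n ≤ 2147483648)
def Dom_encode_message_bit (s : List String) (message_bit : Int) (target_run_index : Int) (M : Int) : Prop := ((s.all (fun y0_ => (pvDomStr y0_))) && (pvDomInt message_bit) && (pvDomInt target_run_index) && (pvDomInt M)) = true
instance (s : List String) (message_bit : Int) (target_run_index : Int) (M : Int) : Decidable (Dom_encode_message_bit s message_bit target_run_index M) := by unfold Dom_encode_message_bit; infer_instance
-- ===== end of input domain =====

-- B replaces A's interleaved nested-while run scan with a boundary-detection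
-- comprehension + zip of consecutive boundaries, then direct indexing of the
-- target qualifying run (objective: alternative decomposition, same O(n) cost).
-- Both Pythons mutate s in place by the same single assignment; the equivalence
-- proved here is about the returned list (which is that same mutated list).

-- ===== PORT A =====

-- inner while: advance i while i < n and s[i] == run_char
def pvAdv (s : List String) (rc : String) (i : Nat) : Nat :=
  if h : i < s.length ∧ s.getD i "" = rc then pvAdv s rc (i + 1) else i
termination_by s.length - i
decreasing_by omega

-- outer while loop of A; c = runs_found
theorem pvAdv_le (s : List String) (rc : String) (i : Nat) : i ≤ pvAdv s rc i := by
  fun_induction pvAdv with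
  | case1 i h ih => omega
  | case2 i h => omega

theorem lt_pvAdv_self (s : List String) (i : Nat) (h : i < s.length) :
    i < pvAdv s (s.getD i "") i := by
  rw [pvAdv]
  have hc : i < s.length ∧ s.getD i "" = s.getD i "" := ⟨h, rfl⟩
  rw [dif_pos hc]
  have := pvAdv_le s (s.getD i "") (i + 1)
  omega

-- outer while loop of A; c = runs_found
def encAGo (s : List String) (d t M c : Int) (i : Nat) : List String :=
  if h : i < s.length then
    if ((pvAdv s (s.getD i "") i : Int) - (i : Int)) ≥ M then
      if c = t then
        (if PySem.Int.mod ((pvAdv s (s.getD i "") i : Int) - (i : Int)) 2 ≠ d then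
          (if ((pvAdv s (s.getD i "") i : Int) - (i : Int)) > M then
            s.set (pvAdv s (s.getD i "") i - 1)
              (if s.getD (pvAdv s (s.getD i "") i - 1) "" = "0" then "1" else "0")
          else if pvAdv s (s.getD i "") i < s.length then
            s.set (pvAdv s (s.getD i "") i) (s.getD i "")
          else if i > 0 then
            s.set (i - 1) (s.getD i "")
          else
            s.set (pvAdv s (s.getD i "") i - 1)
              (if s.getD (pvAdv s (s.getD i "") i - 1) "" = "0" then "1" else "0"))
        else s)
      else encAGo s d t M (c + 1) (pvAdv s (s.getD i "") i)
    else encAGo s d t M c (pvAdv s (s.getD i "") i)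
  else s
termination_by s.length - i
decreasing_by
  all_goals (have := lt_pvAdv_self s i h; omega)

def encode_message_bit (s : List String) (message_bit : Int) (target_run_index : Int) (M : Int) : List String :=
  encAGo s message_bit target_run_index M 0 0

-- ===== PORT B =====
def encode_message_bit_alt (s : List String) (message_bit : Int) (target_run_index : Int) (M : Int) : List String :=
  let n := s.length
  let bounds := ((List.range n).filter (fun j => j = 0 ∨ s.getD j "" ≠ s.getD (j - 1) "")) ++ [n]
  let qualifying := (List.zip bounds bounds.tail).filter (fun p => ((p.2 : Int) - (p.1 : Int)) ≥ M)
  if 0 ≤ target_run_index ∧ target_run_index < (qualifying.length : Int) then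
    let p := qualifying.getD target_run_index.toNat (0, 0)
    if PySem.Int.mod ((p.2 : Int) - (p.1 : Int)) 2 ≠ message_bit then
      if ((p.2 : Int) - (p.1 : Int)) > M then
        s.set (p.2 - 1) (if s.getD (p.2 - 1) "" = "0" then "1" else "0")
      else if p.2 < n then
        s.set p.2 (s.getD p.1 "")
      else if p.1 > 0 then
        s.set (p.1 - 1) (s.getD p.1 "")
      else
        s.set (p.2 - 1) (if s.getD (p.2 - 1) "" = "0" then "1" else "0")
    else s
  else s

-- ===== PRECONDITION & SPEC =====
def Spec_encode_message_bit (s : List String) (message_bit : Int) (target_run_index : Int) (M : Int) (out : List String) : Prop := out = encode_message_bit_alt s message_bit target_run_index M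
instance (s : List String) (message_bit : Int) (target_run_index : Int) (M : Int) (out : List String) : Decidable (Spec_encode_message_bit s message_bit target_run_index M out) := by unfold Spec_encode_message_bit; infer_instance

-- ===== CLAIM (what is proved, stated in full; the proofs are below) =====
def Claim_equal_encode_message_bit : Prop := ∀ (s : List String) (message_bit : Int) (target_run_index : Int) (M : Int), Dom_encode_message_bit s message_bit target_run_index M → Spec_encode_message_bit s message_bit target_run_index M (encode_message_bit s message_bit target_run_index M)

-- ===== LEMMAS AND PROOFS =====

-- reference run list: (start, end) of each maximal run from position i
def runsR (s : List String) (i : Nat) : List (Nat × Nat) :=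
  if h : i < s.length then
    (i, pvAdv s (s.getD i "") i) :: runsR s (pvAdv s (s.getD i "") i)
  else []
termination_by s.length - i
decreasing_by have := lt_pvAdv_self s i h; omega

-- the parity edit applied to a run (start, end), as in both programs
def editRun (s : List String) (M : Int) (p : Nat × Nat) : List String :=
  if ((p.2 : Int) - (p.1 : Int)) > M then
    s.set (p.2 - 1) (if s.getD (p.2 - 1) "" = "0" then "1" else "0")
  else if p.2 < s.length then
    s.set p.2 (s.getD p.1 "")
  else if p.1 > 0 then
    s.set (p.1 - 1) (s.getD p.1 "")
  else
    s.set (p.2 - 1) (if s.getD (p.2 - 1) "" = "0" then "1" else "0")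

-- A's loop, abstracted over an explicit run list
def applyR (s : List String) (d t M : Int) : Int → List (Nat × Nat) → List String
  | _, [] => s
  | c, p :: rest =>
    if ((p.2 : Int) - (p.1 : Int)) ≥ M then
      if c = t then
        (if PySem.Int.mod ((p.2 : Int) - (p.1 : Int)) 2 ≠ d then editRun s M p else s)
      else applyR s d t M (c + 1) rest
    else applyR s d t M c rest

theorem pvAdv_le_len (s : List String) (rc : String) :
    ∀ i, i ≤ s.length → pvAdv s rc i ≤ s.length := by
  intro i
  fun_induction pvAdv with
  | case1 i hc ih => intro _; exact ih (by omega)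
  | case2 i hc => intro h; exact h

theorem pvAdv_run (s : List String) (rc : String) :
    ∀ i j, i ≤ j → j < pvAdv s rc i → s.getD j "" = rc := by
  intro i
  fun_induction pvAdv with
  | case1 i hc ih =>
    intro j hij hlt
    by_cases hj : j = i
    · subst hj; exact hc.2
    · exact ih j (by omega) hlt
  | case2 i hc =>
    intro j hij hlt
    omega

theorem pvAdv_stop (s : List String) (rc : String) (i : Nat) :
    ¬ (pvAdv s rc i < s.length ∧ s.getD (pvAdv s rc i) "" = rc) := by
  fun_induction pvAdv with
  | case1 i hc ih => exact ih
  | case2 i hc => exact hc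

theorem encAGo_eq_applyR (s : List String) (d t M : Int) :
    ∀ k c i, s.length - i ≤ k → encAGo s d t M c i = applyR s d t M c (runsR s i) := by
  intro k
  induction k with
  | zero =>
    intro c i hk
    have hni : ¬ i < s.length := by omega
    rw [encAGo, runsR]
    simp [hni, applyR]
  | succ k ih =>
    intro c i hk
    by_cases h : i < s.length
    · have hlt := lt_pvAdv_self s i h
      have hrec : s.length - pvAdv s (s.getD i "") i ≤ k := by omega
      rw [encAGo, runsR]
      simp only [dif_pos h, applyR, editRun]
      split_ifs <;> first | rfl | exact ih _ _ hrec
    · rw [encAGo, runsR]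
      simp [h, applyR]

theorem applyR_eq_index (s : List String) (d t M : Int) :
    ∀ (L : List (Nat × Nat)) (c : Int),
      applyR s d t M c L =
        if 0 ≤ t - c ∧ t - c < (((L.filter (fun p => ((p.2 : Int) - (p.1 : Int)) ≥ M)).length : Int)) then
          (if PySem.Int.mod ((((L.filter (fun p => ((p.2 : Int) - (p.1 : Int)) ≥ M)).getD (t - c).toNat (0, 0)).2 : Int) - (((L.filter (fun p => ((p.2 : Int) - (p.1 : Int)) ≥ M)).getD (t - c).toNat (0, 0)).1 : Int)) 2 ≠ d then
            editRun s M ((L.filter (fun p => ((p.2 : Int) - (p.1 : Int)) ≥ M)).getD (t - c).toNat (0, 0))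
          else s)
        else s := by
  intro L
  induction L with
  | nil =>
    intro c
    rw [applyR]
    simp only [List.filter_nil, List.length_nil]
    rw [if_neg (by omega)]
  | cons p rest ih =>
    intro c
    rw [applyR]
    by_cases hq : ((p.2 : Int) - (p.1 : Int)) ≥ M
    · have hf : (p :: rest).filter (fun p => ((p.2 : Int) - (p.1 : Int)) ≥ M)
          = p :: rest.filter (fun p => ((p.2 : Int) - (p.1 : Int)) ≥ M) := by
        simp [List.filter_cons, hq]
      rw [if_pos hq, hf]
      by_cases hc : c = t
      · subst hc
        rw [if_pos rfl]
        have hcond : (0:Int) ≤ c - c ∧ c - c < (((p :: rest.filter (fun p => ((p.2 : Int) - (p.1 : Int)) ≥ M)).length : Int)) := by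
          constructor
          · omega
          · rw [List.length_cons]; push_cast; omega
        rw [if_pos hcond, show (c - c).toNat = 0 from by omega]
        simp only [List.getD_cons_zero]
      · rw [if_neg hc, ih (c + 1)]
        rcases lt_trichotomy (t - c) 0 with hlt | heq | hgt
        · rw [if_neg (by omega), if_neg (by omega)]
        · exfalso; exact hc (by omega)
        · have hk : (t - c).toNat = (t - (c + 1)).toNat + 1 := by omega
          rw [hk]
          simp only [List.getD_cons_succ, List.length_cons]
          have hiff : (0 ≤ t - (c + 1) ∧ t - (c + 1) < (((rest.filter (fun p => ((p.2 : Int) - (p.1 : Int)) ≥ M)).length : Int)))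
              ↔ (0 ≤ t - c ∧ t - c < (((rest.filter (fun p => ((p.2 : Int) - (p.1 : Int)) ≥ M)).length + 1 : Nat) : Int)) := by
            push_cast
            omega
          rw [if_congr hiff rfl rfl]
    · have hf : (p :: rest).filter (fun p => ((p.2 : Int) - (p.1 : Int)) ≥ M)
          = rest.filter (fun p => ((p.2 : Int) - (p.1 : Int)) ≥ M) := by
        simp [List.filter_cons, hq]
      rw [if_neg hq, hf, ih c]

theorem bounds_eq (s : List String) :
    ∀ k i, s.length - i ≤ k → (i < s.length → (i = 0 ∨ s.getD i "" ≠ s.getD (i - 1) "")) →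
      (List.range' i (s.length - i)).filter (fun j => j = 0 ∨ s.getD j "" ≠ s.getD (j - 1) "")
        = (runsR s i).map Prod.fst := by
  intro k
  induction k with
  | zero =>
    intro i hk hP
    have h0 : s.length - i = 0 := by omega
    have hni : ¬ i < s.length := by omega
    rw [runsR, dif_neg hni, h0]
    simp
  | succ k ih =>
    intro i hk hP
    by_cases h : i < s.length
    · have hlt := lt_pvAdv_self s i h
      have hle : pvAdv s (s.getD i "") i ≤ s.length := pvAdv_le_len s _ i (by omega)
      have hsplit : List.range' i (s.length - i)
          = List.range' i (pvAdv s (s.getD i "") i - i) ++ List.range' (pvAdv s (s.getD i "") i) (s.length - pvAdv s (s.getD i "") i) := by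
        have e : List.range' i (pvAdv s (s.getD i "") i - i) ++ List.range' (i + (pvAdv s (s.getD i "") i - i)) (s.length - pvAdv s (s.getD i "") i)
            = List.range' i ((pvAdv s (s.getD i "") i - i) + (s.length - pvAdv s (s.getD i "") i)) := List.range'_append_1
        rw [show i + (pvAdv s (s.getD i "") i - i) = pvAdv s (s.getD i "") i from by omega,
            show (pvAdv s (s.getD i "") i - i) + (s.length - pvAdv s (s.getD i "") i) = s.length - i from by omega] at e
        exact e.symm
      have h1 : (List.range' i (pvAdv s (s.getD i "") i - i)).filter (fun j => j = 0 ∨ s.getD j "" ≠ s.getD (j - 1) "") = [i] := by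
        obtain ⟨m, hm⟩ : ∃ m, pvAdv s (s.getD i "") i - i = m + 1 := ⟨pvAdv s (s.getD i "") i - i - 1, by omega⟩
        rw [hm]
        simp only [List.range', List.filter_cons]
        rw [if_pos (by simp only [decide_eq_true_eq]; exact hP h)]
        have hrest : (List.range' (i + 1) m).filter (fun j => j = 0 ∨ s.getD j "" ≠ s.getD (j - 1) "") = [] := by
          rw [List.filter_eq_nil_iff]
          intro j hj
          obtain ⟨kk, hkk, rfl⟩ := List.mem_range'.mp hj
          simp only [decide_eq_true_eq, not_or, not_not]
          constructor
          · omega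
          · have hja := pvAdv_run s (s.getD i "") i (i + 1 + 1 * kk) (by omega) (by omega)
            have hjb := pvAdv_run s (s.getD i "") i (i + 1 + 1 * kk - 1) (by omega) (by omega)
            rw [hja, hjb]
        rw [hrest]
      have h2 := ih (pvAdv s (s.getD i "") i) (by omega) (by
        intro hn
        right
        have ha := pvAdv_stop s (s.getD i "") i
        have hb : s.getD (pvAdv s (s.getD i "") i - 1) "" = s.getD i "" :=
          pvAdv_run s (s.getD i "") i _ (by omega) (by omega)
        rw [hb]
        intro hcontra
        exact ha ⟨hn, hcontra⟩)
      rw [runsR, dif_pos h, hsplit, List.filter_append, h1, h2]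
      simp
    · have h0 : s.length - i = 0 := by omega
      rw [runsR, dif_neg h, h0]
      simp

theorem zip_bounds (s : List String) :
    ∀ k i, s.length - i ≤ k → i ≤ s.length →
      List.zip ((runsR s i).map Prod.fst ++ [s.length]) (((runsR s i).map Prod.fst ++ [s.length]).tail)
        = runsR s i := by
  intro k
  induction k with
  | zero =>
    intro i hk hle
    have hni : ¬ i < s.length := by omega
    rw [runsR, dif_neg hni]
    simp
  | succ k ih =>
    intro i hk hle
    by_cases h : i < s.length
    · have hlt := lt_pvAdv_self s i h
      have hle' : pvAdv s (s.getD i "") i ≤ s.length := pvAdv_le_len s _ i (by omega)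
      have ih' := ih (pvAdv s (s.getD i "") i) (by omega) hle'
      rw [runsR, dif_pos h]
      rcases hR : runsR s (pvAdv s (s.getD i "") i) with _ | ⟨q, R''⟩
      · have hni' : ¬ pvAdv s (s.getD i "") i < s.length := by
          intro hc
          rw [runsR, dif_pos hc] at hR
          exact absurd hR (by simp)
        have hEq : pvAdv s (s.getD i "") i = s.length := by omega
        simp [List.zip]
        exact hEq.symm
      · have h2 : pvAdv s (s.getD i "") i < s.length := by
          by_contra hc
          rw [runsR, dif_neg hc] at hR
          exact absurd hR (by simp)
        have hq1 : q.1 = pvAdv s (s.getD i "") i := by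
          rw [runsR, dif_pos h2] at hR
          have := ((List.cons.injEq _ _ _ _).mp hR).1
          rw [← this]
        rw [hR] at ih'
        simp only [List.map_cons, List.cons_append, List.tail_cons] at ih' ⊢
        rw [List.zip_cons_cons, ih', hq1]
    · have hni : ¬ i < s.length := by omega
      rw [runsR, dif_neg hni]
      simp

-- ===== VERDICT (by name: the statement is the Claim_ definition above) =====
theorem encode_message_bit_spec : Claim_equal_encode_message_bit := by
  intro s mb t M _
  unfold Spec_encode_message_bit
  rw [encode_message_bit,
      encAGo_eq_applyR s mb t M s.length 0 0 (by omega),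
      applyR_eq_index]
  have hb : (List.range s.length).filter (fun j => j = 0 ∨ s.getD j "" ≠ s.getD (j - 1) "")
      = (runsR s 0).map Prod.fst := by
    have := bounds_eq s s.length 0 (by omega) (fun _ => Or.inl rfl)
    simpa [List.range_eq_range'] using this
  have hz := zip_bounds s s.length 0 (by omega) (by omega)
  simp only [encode_message_bit_alt, hb, hz, editRun, Int.sub_zero]
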